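-- pv_equiv track=rewrite | github.com/MrBrantCode/unitest_baseline | mut_generate/mist_train_taco/taco_11005/solution.py | find_closest_swinging_number
-- ===== SOURCE A (Python) =====
-- def find_closest_swinging_number(n: int) -> int:
--     # List of numbers that satisfy Jhool's swinging theorem
--     swinging_numbers = [1729, 4104, 13832, 20683, 32832, 39312, 40033, 46683, 64232, 65728,
--                         110656, 110808, 134379, 149389, 165464, 171288, 195841, 216027,
--                         216125, 262656, 314496, 320264, 327763, 373464, 402597, 439101,
--                         443889, 513000, 513856, 515375, 525824, 558441, 593047, 684019, 704977]
--
--     # Find the closest number less than n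
--     closest_number = -1
--     for number in swinging_numbers:
--         if number < n:
--             closest_number = number
--         else:
--             break
--
--     return closest_number
-- ===== SOURCE B (Python) =====
-- def find_closest_swinging_number(n: int) -> int:
--     swinging_numbers = [1729, 4104, 13832, 20683, 32832, 39312, 40033, 46683, 64232, 65728,
--                         110656, 110808, 134379, 149389, 165464, 171288, 195841, 216027,
--                         216125, 262656, 314496, 320264, 327763, 373464, 402597, 439101,
--                         443889, 513000, 513856, 515375, 525824, 558441, 593047, 684019, 704977]
--     # Binary search for the insertion point of n (bisect_left on the sorted list):
--     # everything to the left of lo is < n, so the answer is the element just before lo.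
--     lo, hi = 0, len(swinging_numbers)
--     while lo < hi:
--         mid = (lo + hi) // 2
--         if swinging_numbers[mid] < n:
--             lo = mid + 1
--         else:
--             hi = mid
--     return swinging_numbers[lo - 1] if lo > 0 else -1
-- ===== Notes on version B (the rewrite author's own statement) =====
-- stated objective: alternative
-- what changed: Replaces A's linear scan-with-break over the constant list by a hand-written binary search (bisect_left) for n's insertion point, returning the element just before it.
import Mathlib
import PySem

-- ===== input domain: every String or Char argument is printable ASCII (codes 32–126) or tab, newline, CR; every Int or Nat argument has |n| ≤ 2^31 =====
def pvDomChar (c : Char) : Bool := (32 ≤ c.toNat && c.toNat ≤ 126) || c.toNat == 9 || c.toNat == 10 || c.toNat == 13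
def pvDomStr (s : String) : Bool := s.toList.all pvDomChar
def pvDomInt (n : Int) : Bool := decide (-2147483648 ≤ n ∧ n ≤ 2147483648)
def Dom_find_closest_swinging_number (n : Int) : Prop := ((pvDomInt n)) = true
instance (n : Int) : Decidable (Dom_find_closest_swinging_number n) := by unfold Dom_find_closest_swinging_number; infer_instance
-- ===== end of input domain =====

-- B replaces A's linear scan-with-break over the constant list by a hand-written binary
-- search (bisect_left) for n's insertion point (alternative algorithm, same result).

-- ===== PORT A =====
def pvSwinging : List Int :=
  [1729, 4104, 13832, 20683, 32832, 39312, 40033, 46683, 64232, 65728, 110656, 110808,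
   134379, 149389, 165464, 171288, 195841, 216027, 216125, 262656, 314496, 320264,
   327763, 373464, 402597, 439101, 443889, 513000, 513856, 515375, 525824, 558441,
   593047, 684019, 704977]

-- A's for-loop with break: update the accumulator while number < n, stop at the first that is not.
def pvLoopA (n : Int) : List Int → Int → Int
  | [], acc => acc
  | x :: xs, acc => if x < n then pvLoopA n xs x else acc

def find_closest_swinging_number (n : Int) : Int := pvLoopA n pvSwinging (-1)

-- ===== PORT B =====
-- Source B's hand-written bisect_left while-loop; lo, hi are Nat (they stay in [0, len] in Python),
-- (lo + hi) // 2 on nonnegative ints is Nat division, and the subscript swinging_numbers[mid]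
-- has 0 ≤ mid < len, so List.getD is exact there.
def pvBS (n : Int) (xs : List Int) (lo hi : Nat) : Nat :=
  if _h : lo < hi then
    if xs.getD ((lo + hi) / 2) 0 < n then pvBS n xs ((lo + hi) / 2 + 1) hi
    else pvBS n xs lo ((lo + hi) / 2)
  else lo
termination_by hi - lo
decreasing_by all_goals omega

def find_closest_swinging_number_alt (n : Int) : Int :=
  let lo := pvBS n pvSwinging 0 pvSwinging.length
  -- swinging_numbers[lo - 1] with lo > 0 is in range, so List.getD is exact
  if lo > 0 then pvSwinging.getD (lo - 1) 0 else -1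

-- ===== PRECONDITION & SPEC =====
def Spec_find_closest_swinging_number (n : Int) (out : Int) : Prop := out = find_closest_swinging_number_alt n
instance (n : Int) (out : Int) : Decidable (Spec_find_closest_swinging_number n out) := by unfold Spec_find_closest_swinging_number; infer_instance

-- ===== CLAIM (what is proved, stated in full; the proofs are below) =====
def Claim_equal_find_closest_swinging_number : Prop := ∀ (n : Int), Dom_find_closest_swinging_number n → Spec_find_closest_swinging_number n (find_closest_swinging_number n)

-- ===== LEMMAS AND PROOFS =====

-- pvBS is the prelude's fuel-based bisect_left loop, given enough fuel and hi ≤ length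
theorem pvBS_eq_loop (n : Int) (xs : List Int) :
    ∀ (fuel lo hi : Nat), hi ≤ xs.length → hi - lo ≤ fuel →
      pvBS n xs lo hi = PySem.List.bisectLeftLoop xs n fuel lo hi := by
  intro fuel
  induction fuel with
  | zero =>
    intro lo hi hlen hf
    rw [pvBS]
    have : ¬ lo < hi := by omega
    simp [PySem.List.bisectLeftLoop, this]
  | succ fuel ih =>
    intro lo hi hlen hf
    rw [pvBS]
    by_cases h : lo < hi
    · have hmid : (lo + hi) / 2 < xs.length := by omega
      have hget : xs[(lo + hi) / 2]? = some xs[(lo + hi) / 2] := List.getElem?_eq_getElem hmid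
      simp only [PySem.List.bisectLeftLoop, h, if_true, hget, List.getD, Option.getD_some]
      by_cases hc : xs[(lo + hi) / 2] < n
      · simp only [hc, if_true]
        exact ih _ _ hlen (by omega)
      · simp only [hc, if_false]
        exact ih _ _ (by omega) (by omega)
    · simp [PySem.List.bisectLeftLoop, h]

theorem pvBS_eq_bisectLeft (n : Int) (xs : List Int) :
    pvBS n xs 0 xs.length = PySem.List.bisectLeft xs n :=
  pvBS_eq_loop n xs xs.length 0 xs.length le_rfl (by omega)

-- A's scan-with-break is getLastD of the takeWhile prefix (no sortedness needed)
theorem pvLoopA_eq_takeWhile (n : Int) :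
    ∀ (xs : List Int) (acc : Int),
      pvLoopA n xs acc = (xs.takeWhile (fun x => decide (x < n))).getLastD acc := by
  intro xs
  induction xs with
  | nil => intro acc; simp [pvLoopA]
  | cons x xs ih =>
    intro acc
    by_cases h : x < n
    · rw [pvLoopA, if_pos h, ih x, List.takeWhile_cons,
        if_pos (show (decide (x < n)) = true by simpa using h), List.getLastD_cons]
    · rw [pvLoopA, if_neg h, List.takeWhile_cons,
        if_neg (show ¬ (decide (x < n)) = true by simpa using h), List.getLastD_nil]

-- takeWhile is take r when p holds exactly on the first r positions
theorem takeWhile_eq_take (p : Int → Bool) :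
    ∀ (xs : List Int) (r : Nat), r ≤ xs.length →
      (∀ j (hj : j < xs.length), j < r → p xs[j]) →
      (∀ j (hj : j < xs.length), r ≤ j → ¬ p xs[j]) →
      xs.takeWhile p = xs.take r := by
  intro xs
  induction xs with
  | nil => intro r _ _ _; simp
  | cons x xs ih =>
    intro r hr h1 h2
    cases r with
    | zero =>
      have := h2 0 (by simp) (by omega)
      simp only [List.getElem_cons_zero] at this
      simp [this]
    | succ r' =>
      have hx : p x := by simpa using h1 0 (by simp) (by omega)
      simp only [List.takeWhile_cons, hx, if_true, List.take_succ_cons]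
      congr 1
      refine ih r' (by simpa using hr) ?_ ?_
      · intro j hj hjr
        have := h1 (j + 1) (by simpa using Nat.succ_lt_succ hj) (by omega)
        simpa using this
      · intro j hj hjr
        have := h2 (j + 1) (by simpa using Nat.succ_lt_succ hj) (by omega)
        simpa using this

-- ===== VERDICT (by name: the statement is the Claim_ definition above) =====
theorem find_closest_swinging_number_spec : Claim_equal_find_closest_swinging_number := by
  intro n _
  unfold Spec_find_closest_swinging_number
  have hsorted : List.Pairwise (fun a b : Int => a ≤ b) pvSwinging := by decide
  obtain ⟨hle, h1, h2⟩ := PySem.List.bisectLeft_spec pvSwinging n hsorted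
  set r := PySem.List.bisectLeft pvSwinging n with hr
  have htw : pvSwinging.takeWhile (fun x => decide (x < n)) = pvSwinging.take r := by
    refine takeWhile_eq_take _ pvSwinging r hle ?_ ?_
    · intro j hj hjr; simpa using h1 j hj hjr
    · intro j hj hjr; simpa using not_lt.mpr (h2 j hj hjr)
  unfold find_closest_swinging_number find_closest_swinging_number_alt
  rw [pvLoopA_eq_takeWhile, htw, pvBS_eq_bisectLeft, ← hr]
  by_cases h0 : r = 0
  · simp [h0]
  · have hpos : 0 < r := Nat.pos_of_ne_zero h0
    have hidx : r - 1 < pvSwinging.length := by omega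
    have hlast : (pvSwinging.take r).getLast? = some pvSwinging[r - 1] := by
      rw [List.getLast?_take]
      simp [h0, List.getElem?_eq_getElem hidx]
    rw [List.getLastD_eq_getLast?, hlast]
    simp [hpos, List.getD_eq_getElem?_getD, List.getElem?_eq_getElem hidx]
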